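-- pv_equiv track=rewrite | github.com/Ansu-dev/python_algorithm | BinarySearch/cut_lan.py | solution
-- ===== SOURCE A (Python) =====
-- def solution(target, lines):
--     answer = 0
--     # lines 오름차순 정렬
--     lines.sort() # O(NlogN)
--     # [247,539,743,802]
--     min_len, max_len = 1, max(lines)
--     # 최소가 최대보다 같거나 작을때 까지만 루프
--     while min_len <= max_len:
--         mid_len = (min_len + max_len) // 2
--         # 중간 랜선의 길이로 몇개를 만들수 있는지 판별
--         total = sum(line // mid_len for line in lines)
--         if total >= target: # 길이가 작아서 target보다 많거나 같기때문에 최대 길이를 구함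
--             answer = mid_len
--             min_len += 1
--         else: # 길이가 너무 커서 개수가 부족하므로
--             max_len -= 1
--     return answer
-- ===== SOURCE B (Python) =====
-- def solution(target, lines):
--     # Invariant-based half-open binary search: lo is always a feasible length
--     # (or 0), every length above hi is infeasible; no separate answer variable,
--     # mid rounds up, and the maximum and the piece count are accumulated with
--     # explicit loops. Note: A sorts `lines` in place; B does not mutate it
--     # (the equivalence is about the return value).
--     hi = lines[0]
--     for l in lines:
--         if hi < l:
--             hi = l
--     lo = 0
--     while lo < hi:
--         mid = (lo + hi + 1) // 2
--         pieces = 0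
--         for l in lines:
--             pieces += l // mid
--         if pieces >= target:
--             lo = mid
--         else:
--             hi = mid - 1
--     return lo
-- ===== Notes on version B (the rewrite author's own statement) =====
-- stated objective: alternative
-- what changed: A probes the midpoint but only moves min/max by one, a linear walk over [1, max(lines)]; B is an invariant-based half-open binary search (lo always feasible or 0, mid rounds up, lo=mid / hi=mid-1, returns lo with no answer variable) and accumulates the maximum and the piece count with explicit loops instead of max()/sum(). …
-- outside the precondition, e.g. on solution(2, [-3, -3, -3, 9, 7]): A returns 3, B returns 1; on solution(1, []): A raises ValueError, B raises IndexError
import Mathlib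
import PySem

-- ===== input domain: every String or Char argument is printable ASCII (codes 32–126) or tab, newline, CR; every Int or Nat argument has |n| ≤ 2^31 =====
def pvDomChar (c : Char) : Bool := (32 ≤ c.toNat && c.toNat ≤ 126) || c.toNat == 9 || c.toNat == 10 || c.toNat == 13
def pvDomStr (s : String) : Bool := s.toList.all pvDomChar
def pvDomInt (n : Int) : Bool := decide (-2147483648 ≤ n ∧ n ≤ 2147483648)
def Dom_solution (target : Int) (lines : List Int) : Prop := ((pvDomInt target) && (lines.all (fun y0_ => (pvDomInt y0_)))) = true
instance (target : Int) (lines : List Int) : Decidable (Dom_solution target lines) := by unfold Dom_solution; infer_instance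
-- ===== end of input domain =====

-- B replaces A's one-step min+=1/max-=1 walk by an invariant-based half-open binary search
-- (lo always feasible or 0, mid rounds up, returns lo); equivalence is about the RETURN
-- value only: A sorts `lines` in place, B does not mutate it.

-- ===== PORT A =====
-- while min_len <= max_len: mid = (min+max)//2; total = sum(line // mid); >= target → answer=mid, min+=1; else max-=1
-- (fuel = the initial interval length, a totality guard only: the loop shrinks the interval by one each pass)
def pvALoop (target : Int) (ls : List Int) : Nat → Int → Int → Int → Int
  | 0, _, _, answer => answer
  | fuel + 1, minLen, maxLen, answer =>
    if minLen ≤ maxLen then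
      let midLen := PySem.Int.floordiv (minLen + maxLen) 2
      let total := (ls.map (fun line => PySem.Int.floordiv line midLen)).sum
      if target ≤ total then pvALoop target ls fuel (minLen + 1) maxLen midLen
      else pvALoop target ls fuel minLen (maxLen - 1) answer
    else answer

def solution (target : Int) (lines : List Int) : Int :=
  -- lines.sort(); then max(lines) over the sorted list (none = ValueError, outside Pre_)
  match PySem.List.max? (PySem.List.sorted lines (fun x => x) false) (fun x => x) with
  | none => 0
  | some mx => pvALoop target (PySem.List.sorted lines (fun x => x) false) mx.toNat 1 mx 0

-- ===== PORT B =====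
-- while lo < hi: mid = (lo+hi+1)//2; pieces accumulated l//mid; >= target → lo=mid; else hi=mid-1; return lo
-- (fuel = the initial interval length, a totality guard only: each pass strictly shrinks the interval)
def pvBLoop (target : Int) (ls : List Int) : Nat → Int → Int → Int
  | 0, lo, _ => lo
  | fuel + 1, lo, hi =>
    if lo < hi then
      let mid := PySem.Int.floordiv (lo + hi + 1) 2
      let pieces := ls.foldl (fun acc l => acc + PySem.Int.floordiv l mid) 0
      if target ≤ pieces then pvBLoop target ls fuel mid hi
      else pvBLoop target ls fuel lo (mid - 1)
    else lo

def solution_alt (target : Int) (lines : List Int) : Int :=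
  match PySem.List.pyGet? lines 0 with   -- lines[0]; none = IndexError, outside Pre_
  | none => 0
  | some h0 =>
    let mx := lines.foldl (fun hi l => if hi < l then l else hi) h0
    pvBLoop target lines mx.toNat 0 mx

-- ===== PRECONDITION & SPEC =====
-- Pre_ excludes empty `lines` (A's max([]) raises ValueError, B's lines[0] raises
-- IndexError) and lists mixing negative and positive lengths, which lie outside the
-- task's natural domain (cable lengths are nonnegative): there the piece count
-- sum(l//m) is not monotone in m, so neither loop's answer is the specified one and
-- the two can disagree.
def Pre_solution (target : Int) (lines : List Int) : Prop :=
  lines ≠ [] ∧ ((∀ l ∈ lines, 0 ≤ l) ∨ (∀ l ∈ lines, l ≤ 0))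
instance (target : Int) (lines : List Int) : Decidable (Pre_solution target lines) := by
  unfold Pre_solution; infer_instance

def pvWitness_solution : Int × List Int := (4, [8, 1, 5])

def Spec_solution (target : Int) (lines : List Int) (out : Int) : Prop := out = solution_alt target lines
instance (target : Int) (lines : List Int) (out : Int) : Decidable (Spec_solution target lines out) := by unfold Spec_solution; infer_instance

-- ===== CLAIM (what is proved, stated in full; the proofs are below) =====
def Claim_equal_solution : Prop := ∀ (target : Int) (lines : List Int), Dom_solution target lines → Pre_solution target lines → Spec_solution target lines (solution target lines)

-- ===== LEMMAS AND PROOFS =====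

-- the piece count both loops test
def pvCnt (ls : List Int) (m : Int) : Int := (ls.map (fun line => PySem.Int.floordiv line m)).sum

-- reference scan: greatest m in [lo, hi] with count ≥ target, else answer
def pvLin (target : Int) (ls : List Int) (lo hi answer : Int) : Int :=
  if h : lo ≤ hi then
    if target ≤ pvCnt ls hi then hi else pvLin target ls lo (hi - 1) answer
  else answer
termination_by (hi + 1 - lo).toNat
decreasing_by omega

theorem pvCnt_anti (ls : List Int) (hnn : ∀ l ∈ ls, 0 ≤ l) (m m' : Int)
    (h1 : 1 ≤ m) (hmm : m ≤ m') : pvCnt ls m' ≤ pvCnt ls m := by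
  induction ls with
  | nil => simp [pvCnt]
  | cons a t ih =>
    have ha : 0 ≤ a := hnn a (by simp)
    have ht := ih (fun l hl => hnn l (by simp [hl]))
    have hstep : PySem.Int.floordiv a m' ≤ PySem.Int.floordiv a m := by
      rw [PySem.Int.floordiv_eq_ediv_of_pos (by omega), PySem.Int.floordiv_eq_ediv_of_pos (by omega)]
      have h0 : 0 ≤ a / m' := Int.ediv_nonneg ha (by omega)
      have hle : a / m' * m' ≤ a := Int.ediv_mul_le a (by omega)
      exact (Int.le_ediv_iff_mul_le (by omega)).mpr
        (le_trans (mul_le_mul_of_nonneg_left hmm h0) hle)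
    simp only [pvCnt, List.map_cons, List.sum_cons] at *
    omega

theorem pvLin_shift_lo (target : Int) (ls : List Int) (lo mid hi ans : Int)
    (h1 : lo ≤ mid) (h2 : mid ≤ hi) (hp : target ≤ pvCnt ls mid) :
    pvLin target ls lo hi ans = pvLin target ls (mid + 1) hi mid := by
  by_cases hh : mid + 1 ≤ hi
  · conv_lhs => rw [pvLin]
    conv_rhs => rw [pvLin]
    rw [dif_pos (show lo ≤ hi by omega), dif_pos hh]
    by_cases hP : target ≤ pvCnt ls hi
    · rw [if_pos hP, if_pos hP]
    · rw [if_neg hP, if_neg hP]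
      exact pvLin_shift_lo target ls lo mid (hi - 1) ans h1 (by omega) hp
  · have he : hi = mid := by omega
    subst he
    conv_lhs => rw [pvLin]
    conv_rhs => rw [pvLin]
    rw [dif_pos (show lo ≤ hi by omega), dif_neg (show ¬ hi + 1 ≤ hi by omega), if_pos hp]
termination_by (hi - mid).toNat
decreasing_by omega

theorem pvLin_shrink_hi (target : Int) (ls : List Int) (lo mid hi ans : Int)
    (hfail : ∀ m, mid ≤ m → ¬ target ≤ pvCnt ls m) (h2 : mid ≤ hi) :
    pvLin target ls lo hi ans = pvLin target ls lo (mid - 1) ans := by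
  by_cases hh : mid + 1 ≤ hi
  · conv_lhs => rw [pvLin]
    by_cases hl : lo ≤ hi
    · rw [dif_pos hl, if_neg (hfail hi (by omega))]
      exact pvLin_shrink_hi target ls lo mid (hi - 1) ans hfail (by omega)
    · rw [dif_neg hl]
      conv_rhs => rw [pvLin]
      rw [dif_neg (show ¬ lo ≤ mid - 1 by omega)]
  · have he : hi = mid := by omega
    subst he
    conv_lhs => rw [pvLin]
    by_cases hl : lo ≤ hi
    · rw [dif_pos hl, if_neg (hfail hi (by omega))]
    · rw [dif_neg hl]
      conv_rhs => rw [pvLin]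
      rw [dif_neg (show ¬ lo ≤ hi - 1 by omega)]
termination_by (hi - mid).toNat
decreasing_by omega

theorem pvALoop_eq_lin (target : Int) (ls : List Int) (fuel : Nat) (lo hi ans : Int)
    (hmono : ∀ m m', 1 ≤ m → m ≤ m' → pvCnt ls m' ≤ pvCnt ls m) (hlo : 1 ≤ lo)
    (hf : (hi + 1 - lo).toNat ≤ fuel) :
    pvALoop target ls fuel lo hi ans = pvLin target ls lo hi ans := by
  induction fuel generalizing lo hi ans with
  | zero =>
    rw [pvALoop, pvLin, dif_neg (by omega : ¬ lo ≤ hi)]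
  | succ n ih =>
    by_cases h : lo ≤ hi
    · have hb := PySem.Int.floordiv_two_mid_bounds (lo := lo) (hi := hi) h
      rw [pvALoop, if_pos h]
      set mid := PySem.Int.floordiv (lo + hi) 2 with hmid
      by_cases hP : target ≤ pvCnt ls mid
      · rw [if_pos (by simpa [pvCnt] using hP)]
        rw [ih (lo + 1) hi mid (by omega) (by omega)]
        rw [pvLin_shift_lo target ls lo mid hi ans hb.1 hb.2 hP]
        by_cases hlm : lo + 1 ≤ mid
        · rw [pvLin_shift_lo target ls (lo + 1) mid hi mid hlm hb.2 hP]
        · have : mid = lo := by omega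
          simp [this]
      · rw [if_neg (by simpa [pvCnt] using hP)]
        rw [ih lo (hi - 1) ans hlo (by omega)]
        have hfail : ∀ m, mid ≤ m → ¬ target ≤ pvCnt ls m := by
          intro m hm ht
          exact hP (le_trans ht (hmono mid m (by omega) hm))
        rw [pvLin_shrink_hi target ls lo mid hi ans hfail hb.2]
        rcases (by omega : mid = hi ∨ mid + 1 ≤ hi) with he | hlt
        · rw [he]
        · rw [pvLin_shrink_hi target ls lo mid (hi - 1) ans hfail (by omega)]
    · rw [pvALoop, if_neg h, pvLin, dif_neg h]

-- midpoint (lo + hi + 1) // 2 of the half-open search stays in (lo, hi]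
theorem pvBMid_bounds (lo hi : Int) (h : lo < hi) :
    lo + 1 ≤ PySem.Int.floordiv (lo + hi + 1) 2 ∧ PySem.Int.floordiv (lo + hi + 1) 2 ≤ hi := by
  rw [PySem.Int.floordiv_eq_ediv_of_pos (by omega)]
  omega

-- B's half-open loop also equals the reference scan: lo is the running answer
theorem pvBLoop_eq_lin (target : Int) (ls : List Int) (fuel : Nat) (lo hi : Int)
    (hmono : ∀ m m', 1 ≤ m → m ≤ m' → pvCnt ls m' ≤ pvCnt ls m) (hlo : 0 ≤ lo)
    (hf : (hi - lo).toNat ≤ fuel) :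
    pvBLoop target ls fuel lo hi = pvLin target ls (lo + 1) hi lo := by
  induction fuel generalizing lo hi with
  | zero =>
    rw [pvBLoop, pvLin, dif_neg (by omega : ¬ lo + 1 ≤ hi)]
  | succ n ih =>
    by_cases h : lo < hi
    · have hb := pvBMid_bounds lo hi h
      rw [pvBLoop, if_pos h]
      set mid := PySem.Int.floordiv (lo + hi + 1) 2 with hmid
      have hc : ls.foldl (fun acc l => acc + PySem.Int.floordiv l mid) 0 = pvCnt ls mid := by
        rw [PySem.List.foldl_add]; simp [pvCnt]
      by_cases hP : target ≤ pvCnt ls mid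
      · rw [if_pos (by rw [hc]; exact hP)]
        rw [ih mid hi (by omega) (by omega)]
        rw [pvLin_shift_lo target ls (lo + 1) mid hi lo hb.1 hb.2 hP]
      · rw [if_neg (by rw [hc]; exact hP)]
        rw [ih lo (mid - 1) hlo (by omega)]
        have hfail : ∀ m, mid ≤ m → ¬ target ≤ pvCnt ls m := by
          intro m hm ht
          exact hP (le_trans ht (hmono mid m (by omega) hm))
        rw [pvLin_shrink_hi target ls (lo + 1) mid hi lo hfail hb.2]
    · rw [pvBLoop, if_neg h, pvLin, dif_neg (show ¬ lo + 1 ≤ hi by omega)]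

theorem pvLin_congr (target : Int) (ls1 ls2 : List Int) (lo hi ans : Int)
    (hc : ∀ m, pvCnt ls1 m = pvCnt ls2 m) :
    pvLin target ls1 lo hi ans = pvLin target ls2 lo hi ans := by
  by_cases h : lo ≤ hi
  · conv_lhs => rw [pvLin]
    conv_rhs => rw [pvLin]
    rw [dif_pos h, dif_pos h, hc hi]
    by_cases hP : target ≤ pvCnt ls2 hi
    · rw [if_pos hP, if_pos hP]
    · rw [if_neg hP, if_neg hP]
      exact pvLin_congr target ls1 ls2 lo (hi - 1) ans hc
  · conv_lhs => rw [pvLin]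
    conv_rhs => rw [pvLin]
    rw [dif_neg h, dif_neg h]
termination_by (hi + 1 - lo).toNat
decreasing_by omega

-- the sorted copy has the same count as `lines`
theorem pvCnt_sorted (lines : List Int) (m : Int) :
    pvCnt (PySem.List.sorted lines (fun x => x) false) m = pvCnt lines m :=
  List.Perm.sum_eq ((PySem.List.sorted_perm lines (fun x => x) false).map _)

-- B's fold-max: the result is an element of acc :: ls and an upper bound of it
theorem pvFoldMax_spec (ls : List Int) (a : Int) :
    (ls.foldl (fun hi l => if hi < l then l else hi) a = a
       ∨ ls.foldl (fun hi l => if hi < l then l else hi) a ∈ ls)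
    ∧ a ≤ ls.foldl (fun hi l => if hi < l then l else hi) a
    ∧ ∀ l ∈ ls, l ≤ ls.foldl (fun hi l => if hi < l then l else hi) a := by
  induction ls generalizing a with
  | nil => simp
  | cons x t ih =>
    simp only [List.foldl_cons]
    by_cases hx : a < x
    · rw [if_pos hx]
      obtain ⟨hmem, hle, hub⟩ := ih x
      refine ⟨?_, by omega, ?_⟩
      · rcases hmem with he | hm
        · exact Or.inr (by simp [he])
        · exact Or.inr (by simp [hm])
      · intro l hl
        rcases List.mem_cons.mp hl with he | hm
        · subst he; exact hle
        · exact hub l hm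
    · rw [if_neg hx]
      obtain ⟨hmem, hle, hub⟩ := ih a
      refine ⟨?_, hle, ?_⟩
      · rcases hmem with he | hm
        · exact Or.inl he
        · exact Or.inr (List.mem_cons_of_mem _ hm)
      · intro l hl
        rcases List.mem_cons.mp hl with he | hm
        · subst he; omega
        · exact hub l hm

-- on a nonempty list, B's fold-max starting from lines[0] equals max(lines)
theorem pvFoldMax_eq_max? (lines : List Int) (h0 : Int)
    (hget : PySem.List.pyGet? lines 0 = some h0) :
    PySem.List.max? lines (fun x => x)
      = some (lines.foldl (fun hi l => if hi < l then l else hi) h0) := by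
  have hmem0 : h0 ∈ lines := PySem.List.mem_of_pyGet?_eq_some lines hget
  obtain ⟨hmem, hle, hub⟩ := pvFoldMax_spec lines h0
  have hfm : lines.foldl (fun hi l => if hi < l then l else hi) h0 ∈ lines := by
    rcases hmem with he | hm
    · rw [he]; exact hmem0
    · exact hm
  cases hl : PySem.List.max? lines (fun x => x) with
  | none =>
    rw [PySem.List.max?_eq_none_iff] at hl
    simp [hl] at hmem0
  | some m =>
    have h1 : lines.foldl (fun hi l => if hi < l then l else hi) h0 ≤ m :=
      PySem.List.max?_isMax hl _ hfm
    have h2 : m ≤ lines.foldl (fun hi l => if hi < l then l else hi) h0 :=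
      hub m (PySem.List.max?_mem hl)
    exact congrArg some (le_antisymm h2 h1)

theorem pvMax_sorted (lines : List Int) :
    PySem.List.max? (PySem.List.sorted lines (fun x => x) false) (fun x => x)
      = PySem.List.max? lines (fun x => x) := by
  have hperm := PySem.List.sorted_perm lines (fun x => x) false
  cases hs : PySem.List.max? (PySem.List.sorted lines (fun x => x) false) (fun x => x) with
  | none =>
    rw [PySem.List.max?_eq_none_iff, PySem.List.sorted_eq_nil_iff _ _ _] at hs
    rw [eq_comm, PySem.List.max?_eq_none_iff]
    exact hs
  | some m =>
    cases hl : PySem.List.max? lines (fun x => x) with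
    | none =>
      rw [PySem.List.max?_eq_none_iff] at hl
      rw [hl] at hs
      rw [show PySem.List.sorted ([] : List Int) (fun x => x) false = []
            from (PySem.List.sorted_eq_nil_iff _ _ _).mpr rfl] at hs
      rw [(PySem.List.max?_eq_none_iff _ _).mpr rfl] at hs
      exact absurd hs (by simp)
    | some m' =>
      have hm := PySem.List.max?_mem hs
      have hm' := PySem.List.max?_mem hl
      have h1 : m ≤ m' := PySem.List.max?_isMax hl m (hperm.mem_iff.mp hm)
      have h2 : m' ≤ m := PySem.List.max?_isMax hs m' (hperm.mem_iff.mpr hm')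
      exact congrArg some (le_antisymm h1 h2)

-- ===== VERDICT (by name: the statement is the Claim_ definition above) =====
theorem solution_spec : Claim_equal_solution := by
  intro target lines _hD hPre
  rcases hPre with ⟨hne, hsign⟩
  unfold Spec_solution solution solution_alt
  obtain ⟨x, t, he⟩ : ∃ x t, lines = x :: t := by
    cases lines with
    | nil => exact absurd rfl hne
    | cons x t => exact ⟨x, t, rfl⟩
  have hget : PySem.List.pyGet? lines 0 = some x := by
    rw [he]; exact PySem.List.pyGet?_zero_cons x t
  rw [hget, pvMax_sorted, pvFoldMax_eq_max? lines x hget]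
  set mx := lines.foldl (fun hi l => if hi < l then l else hi) x with hmx
  show pvALoop target (PySem.List.sorted lines (fun x => x) false) mx.toNat 1 mx 0
    = pvBLoop target lines mx.toNat 0 mx
  have hmxmem : mx ∈ lines := by
    have := PySem.List.max?_mem (pvFoldMax_eq_max? lines x hget)
    exact this
  rcases hsign with hnn | hnp
  · -- all lengths nonnegative: the count is antitone, both loops equal the reference scan
    have hmono : ∀ m m', 1 ≤ m → m ≤ m' → pvCnt lines m' ≤ pvCnt lines m :=
      fun m m' h1 hmm => pvCnt_anti lines hnn m m' h1 hmm
    have hmonoS : ∀ m m', 1 ≤ m → m ≤ m' →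
        pvCnt (PySem.List.sorted lines (fun x => x) false) m'
          ≤ pvCnt (PySem.List.sorted lines (fun x => x) false) m := by
      intro m m' h1 hmm
      rw [pvCnt_sorted, pvCnt_sorted]
      exact hmono m m' h1 hmm
    rw [pvALoop_eq_lin target _ mx.toNat 1 mx 0 hmonoS (by omega) (by omega)]
    rw [pvBLoop_eq_lin target lines mx.toNat 0 mx hmono (by omega) (by omega)]
    exact pvLin_congr target _ lines 1 mx 0 (fun m => pvCnt_sorted lines m)
  · -- all lengths ≤ 0: max ≤ 0, fuel mx.toNat = 0: neither loop runs; both return 0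
    have hmxle : mx ≤ 0 := hnp mx hmxmem
    have h0 : mx.toNat = 0 := by omega
    rw [h0]
    rw [pvALoop, pvBLoop]
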